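-- pv_equiv track=rewrite | github.com/atviriduomenys/katalogas | vitrina/datasets/structure.py | _split_dim
-- ===== SOURCE A (Python) =====
-- from typing import Any, Iterable, NamedTuple, TypedDict, Tuple, List
--
-- def _split_dim(
--     dims: list[str],
--     row: dict[str, Any],
-- ) -> tuple[
--     list[str],  # upper
--     str,        # found
--     list[str],  # lower
-- ]:
--     upper = []
--     lower = []
--     found = None
--     for dim in dims:
--         if row[dim]:
--             found = dim
--         elif found:
--             lower.append(dim)
--         else:
--             upper.append(dim)
--     return upper, found, lower
-- ===== SOURCE B (Python) =====
-- def _split_dim(dims, row):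
--     vals = [bool(row[d]) for d in dims]
--     if True not in vals:
--         return list(dims), None, []
--     b = vals.index(True)
--     found = dims[len(dims) - 1 - vals[::-1].index(True)]
--     upper = dims[:b]
--     lower = [d for d, v in zip(dims[b:], vals[b:]) if not v]
--     return upper, found, lower
-- ===== Notes on version B (the rewrite author's own statement) =====
-- stated objective: alternative
-- what changed: Instead of one scan maintaining a running found flag with a three-way branch, B materializes the truth values once, locates the first and last truthy indices, and obtains upper/found/lower by slicing and filtering around that boundary.
-- outside the precondition, e.g. on _split_dim(['', 'a'], {'': True, 'a': False}): A returns (['a'], '', []), B returns ([], '', ['a']); on _split_dim(['a'], {}): A raises KeyError, B raises KeyError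
import Mathlib
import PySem

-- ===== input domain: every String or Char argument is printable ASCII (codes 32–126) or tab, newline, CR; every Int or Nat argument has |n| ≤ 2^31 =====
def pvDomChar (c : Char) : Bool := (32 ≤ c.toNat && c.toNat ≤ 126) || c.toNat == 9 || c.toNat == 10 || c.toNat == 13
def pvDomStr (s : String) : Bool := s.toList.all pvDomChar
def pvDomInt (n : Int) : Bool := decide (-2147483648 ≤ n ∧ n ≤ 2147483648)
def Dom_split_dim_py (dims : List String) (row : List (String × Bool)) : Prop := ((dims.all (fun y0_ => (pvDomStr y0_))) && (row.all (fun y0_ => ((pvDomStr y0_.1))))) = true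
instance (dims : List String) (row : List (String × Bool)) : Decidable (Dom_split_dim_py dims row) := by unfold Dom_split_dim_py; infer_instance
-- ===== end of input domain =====

-- B replaces A's single scan with a running 'found' flag by: materialize the truth
-- values once, find the first and last truthy indices, then slice and filter around
-- that boundary.  Alternative decomposition, same asymptotic cost.

-- row[dim] for the assoc-list dict (first match); the default false is only reached
-- outside Pre_ (missing key = Python KeyError).
def pyRowVal (row : List (String × Bool)) (dim : String) : Bool :=
  ((row.find? (fun p => p.1 == dim)).map Prod.snd).getD false

-- ===== PORT A =====
-- 'elif found:' tests Python truthiness of the found NAME: None or "" is falsy.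
def pyTruthyName (o : Option String) : Bool :=
  match o with
  | none => false
  | some s => !(s == "")

-- the body of A's for-loop over (upper, found, lower)
def stepA (row : List (String × Bool)) (st : List String × Option String × List String)
    (dim : String) : List String × Option String × List String :=
  if pyRowVal row dim then (st.1, some dim, st.2.2)
  else if pyTruthyName st.2.1 then (st.1, st.2.1, st.2.2 ++ [dim])
  else (st.1 ++ [dim], st.2.1, st.2.2)

def split_dim_py (dims : List String) (row : List (String × Bool)) : List String × Option String × List String :=
  dims.foldl (stepA row) ([], none, [])

-- ===== PORT B =====
-- B's vals = [bool(row[d]) for d in dims] is written out as dims.map (pyRowVal row)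
-- at each of its uses.
def split_dim_py_alt (dims : List String) (row : List (String × Bool)) : List String × Option String × List String :=
  match PySem.List.index? (dims.map (pyRowVal row)) true with
  | none => (dims, none, [])
  | some b =>
    (dims.take b,
     match PySem.List.index? (dims.map (pyRowVal row)).reverse true with
     | some k => PySem.List.pyGet? dims ((dims.length : Int) - 1 - (k : Int))
     | none => none,
     ((dims.drop b).zip ((dims.map (pyRowVal row)).drop b)).filterMap
       (fun p => if p.2 then none else some p.1))

-- ===== PRECONDITION & SPEC =====
-- Pre_ excludes (a) inputs with a dim missing from row's keys, where A raises
-- KeyError (B raises there too), and (b) dims containing the empty string, a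
-- degenerate dimension name on which A's truthiness test 'elif found:' ignores an
-- empty-named marker when classifying later columns — a corner no caller
-- specifies, where B's boundary split is as defensible as A's value.
def Pre_split_dim_py (dims : List String) (row : List (String × Bool)) : Prop :=
  (∀ d ∈ dims, (row.find? (fun p => p.1 == d)).isSome) ∧ "" ∉ dims
instance (dims : List String) (row : List (String × Bool)) : Decidable (Pre_split_dim_py dims row) := by unfold Pre_split_dim_py; infer_instance

def pvWitness_split_dim_py : List String × (List (String × Bool)) :=
  (["a", "b", "c"], [("a", false), ("b", true), ("c", false)])

def Spec_split_dim_py (dims : List String) (row : List (String × Bool)) (out : List String × Option String × List String) : Prop := out = split_dim_py_alt dims row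
instance (dims : List String) (row : List (String × Bool)) (out : List String × Option String × List String) : Decidable (Spec_split_dim_py dims row out) := by unfold Spec_split_dim_py; infer_instance

-- ===== CLAIM (what is proved, stated in full; the proofs are below) =====
def Claim_equal_split_dim_py : Prop := ∀ (dims : List String) (row : List (String × Bool)), Dom_split_dim_py dims row → Pre_split_dim_py dims row → Spec_split_dim_py dims row (split_dim_py dims row)

-- ===== LEMMAS AND PROOFS =====

theorem stepA_true {row : List (String × Bool)} {d : String} (h : pyRowVal row d = true)
    (u lo : List String) (fo : Option String) :
    stepA row (u, fo, lo) d = (u, some d, lo) := by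
  simp [stepA, h]

theorem stepA_false_some {row : List (String × Bool)} {d f : String}
    (h : pyRowVal row d = false) (hf : f ≠ "") (u lo : List String) :
    stepA row (u, some f, lo) d = (u, some f, lo ++ [d]) := by
  simp [stepA, h, pyTruthyName, hf]

theorem stepA_false_none {row : List (String × Bool)} {d : String}
    (h : pyRowVal row d = false) (u lo : List String) :
    stepA row (u, none, lo) d = (u ++ [d], none, lo) := by
  simp [stepA, h, pyTruthyName]

-- the last truthy name picked by A's running update is getLastD of the truthy filter
theorem pickLast_eq_getLastD (v : String → Bool) (l : List String) (f : String) :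
    l.foldl (fun a d => if v d then d else a) f = (l.filter v).getLastD f := by
  induction l generalizing f with
  | nil => rfl
  | cons d l ih =>
    rw [List.foldl_cons, List.filter_cons]
    by_cases h : v d = true
    · rw [if_pos h, if_pos h, List.getLastD_cons, ih]
    · rw [if_neg h, if_neg h, ih]

-- phase 2 of A's loop: after a nonempty-named marker has been found
theorem foldA_some (row : List (String × Bool)) (l : List String) (u : List String) :
    ∀ (lo : List String) (f : String), f ≠ "" → (∀ d ∈ l, d ≠ "") →
    l.foldl (stepA row) (u, some f, lo)
    = (u, some (l.foldl (fun a d => if pyRowVal row d then d else a) f),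
        lo ++ l.filter (fun d => !pyRowVal row d)) := by
  induction l with
  | nil => intro lo f _ _; simp
  | cons d l ih =>
    intro lo f hf hl
    have hd : d ≠ "" := hl d (by simp)
    have hl' : ∀ x ∈ l, x ≠ "" := fun x hx => hl x (List.mem_cons_of_mem _ hx)
    by_cases h : pyRowVal row d = true
    · rw [List.foldl_cons, stepA_true h, ih lo d hd hl',
        List.foldl_cons, if_pos h, List.filter_cons]
      simp [h]
    · rw [List.foldl_cons, stepA_false_some (Bool.not_eq_true _ ▸ h) hf,
        ih (lo ++ [d]) f hf hl', List.foldl_cons, if_neg h, List.filter_cons]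
      simp [h, List.append_assoc]

-- phase 1 of A's loop: before any marker is found
theorem foldA_none (row : List (String × Bool)) (l : List String)
    (hl : ∀ d ∈ l, d ≠ "") : ∀ (u : List String),
    l.foldl (stepA row) (u, none, [])
    = (u ++ l.takeWhile (fun d => !pyRowVal row d),
        (l.filter (pyRowVal row)).getLast?,
        (l.dropWhile (fun d => !pyRowVal row d)).filter (fun d => !pyRowVal row d)) := by
  induction l with
  | nil => intro u; simp
  | cons d l ih =>
    intro u
    have hd : d ≠ "" := hl d (by simp)
    have hl' : ∀ x ∈ l, x ≠ "" := fun x hx => hl x (List.mem_cons_of_mem _ hx)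
    by_cases h : pyRowVal row d = true
    · rw [List.foldl_cons, stepA_true h, foldA_some row l u [] d hd hl']
      simp [h, pickLast_eq_getLastD, List.getLastD_eq_getLast?, List.getLast?_cons,
        List.takeWhile_cons, List.dropWhile_cons, List.filter_cons]
    · rw [List.foldl_cons, stepA_false_none (Bool.not_eq_true _ ▸ h), ih hl' (u ++ [d]),
        List.takeWhile_cons, List.dropWhile_cons, List.filter_cons]
      simp [h, List.append_assoc]

-- a falsy prefix before a truthy element: where takeWhile/dropWhile stop
theorem takeWhile_falsy_prefix (v : String → Bool) (p s : List String) (t : String)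
    (hp : ∀ x ∈ p, v x = false) (ht : v t = true) :
    (p ++ t :: s).takeWhile (fun d => !v d) = p := by
  induction p with
  | nil => simp [List.takeWhile_cons, ht]
  | cons a q ih =>
    have ha : v a = false := hp a (by simp)
    have hq := ih (fun x hx => hp x (List.mem_cons_of_mem _ hx))
    simp [List.takeWhile_cons, ha, hq]

theorem dropWhile_falsy_prefix (v : String → Bool) (p s : List String) (t : String)
    (hp : ∀ x ∈ p, v x = false) (ht : v t = true) :
    (p ++ t :: s).dropWhile (fun d => !v d) = t :: s := by
  induction p with
  | nil => simp [List.dropWhile_cons, ht]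
  | cons a q ih =>
    have ha : v a = false := hp a (by simp)
    have hq := ih (fun x hx => hp x (List.mem_cons_of_mem _ hx))
    simpa [List.dropWhile_cons, ha] using hq

-- a list zipped with its own truth values, filtered on falsy, is a plain filter
theorem zip_vals_filterMap (v : String → Bool) (l : List String) :
    (l.zip (l.map v)).filterMap (fun p => if p.2 then none else some p.1)
    = l.filter (fun d => !v d) := by
  induction l with
  | nil => rfl
  | cons d l ih =>
    by_cases h : v d = true <;> simp [h, ih]

-- ===== VERDICT (by name: the statement is the Claim_ definition above) =====
theorem split_dim_py_spec : Claim_equal_split_dim_py := by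
  intro dims row _ hpre
  obtain ⟨_, hne⟩ := hpre
  have hl : ∀ d ∈ dims, d ≠ "" := fun d hd h => hne (h ▸ hd)
  unfold Spec_split_dim_py split_dim_py split_dim_py_alt
  rw [foldA_none row dims hl []]
  cases hidx : PySem.List.index? (dims.map (pyRowVal row)) true with
  | none =>
    have hmem : true ∉ dims.map (pyRowVal row) :=
      (PySem.List.index?_eq_none_iff _ _).mp hidx
    have hall : ∀ d ∈ dims, pyRowVal row d = false := by
      intro d hd
      by_contra h
      exact hmem (List.mem_map.mpr ⟨d, hd, by simpa using h⟩)
    have h1 : dims.takeWhile (fun d => !pyRowVal row d) = dims :=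
      List.takeWhile_eq_self_iff.mpr (by intro x hx; simp [hall x hx])
    have h2 : dims.filter (pyRowVal row) = [] :=
      List.filter_eq_nil_iff.mpr (by intro x hx; simp [hall x hx])
    have h3 : dims.dropWhile (fun d => !pyRowVal row d) = [] :=
      List.dropWhile_eq_nil_iff.mpr (by intro x hx; simp [hall x hx])
    rw [h1, h2, h3]
    simp
  | some b =>
    obtain ⟨pre, suf, hsplit, hlen, hpre'⟩ :=
      (PySem.List.index?_eq_some_iff _ _ _).mp hidx
    obtain ⟨p, rest, hdims, hp, hrest⟩ := List.map_eq_append_iff.mp hsplit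
    obtain ⟨t, s, hrest', hvt, hs⟩ := List.map_eq_cons_iff.mp hrest
    subst hrest'
    have hpfalse : ∀ x ∈ p, pyRowVal row x = false := by
      intro x hx
      by_contra h
      exact hpre' (hp ▸ List.mem_map.mpr ⟨x, hx, by simpa using h⟩)
    have hplen : p.length = b := by rw [← hlen, ← hp, List.length_map]
    have hup : dims.take b = p := hdims ▸ List.take_left' hplen
    have htw : dims.takeWhile (fun d => !pyRowVal row d) = p := by
      rw [hdims]; exact takeWhile_falsy_prefix _ _ _ _ hpfalse hvt
    have hdw : dims.dropWhile (fun d => !pyRowVal row d) = t :: s := by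
      rw [hdims]; exact dropWhile_falsy_prefix _ _ _ _ hpfalse hvt
    have hdrop : dims.drop b = t :: s := hdims ▸ List.drop_left' hplen
    have hvals : (dims.map (pyRowVal row)).drop b = (t :: s).map (pyRowVal row) := by
      rw [← List.map_drop, hdrop]
    have hmemrev : true ∈ (dims.map (pyRowVal row)).reverse := by
      rw [List.mem_reverse, hsplit]; simp
    cases hk : PySem.List.index? (dims.map (pyRowVal row)).reverse true with
    | none => exact absurd hmemrev ((PySem.List.index?_eq_none_iff _ _).mp hk)
    | some k =>
      obtain ⟨pre2, suf2, hsplit2, hlen2, hpre2⟩ :=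
        (PySem.List.index?_eq_some_iff _ _ _).mp hk
      rw [← List.map_reverse] at hsplit2
      obtain ⟨q, rest2, hdrev, hq, hrest2⟩ := List.map_eq_append_iff.mp hsplit2
      obtain ⟨r, w, hrest2', hvr, hw⟩ := List.map_eq_cons_iff.mp hrest2
      subst hrest2'
      have hqfalse : ∀ x ∈ q, pyRowVal row x = false := by
        intro x hx
        by_contra h
        exact hpre2 (hq ▸ List.mem_map.mpr ⟨x, hx, by simpa using h⟩)
      have hqlen : q.length = k := by rw [← hlen2, ← hq, List.length_map]
      have hdims2 : dims = w.reverse ++ r :: q.reverse := by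
        have := congrArg List.reverse hdrev
        simpa using this
      have hlendims : dims.length = w.length + 1 + k := by
        rw [hdims2]; simp [hqlen]; omega
      have hcast : (dims.length : Int) - 1 - (k : Int) = ((w.length : Nat) : Int) := by
        rw [hlendims]; push_cast; ring
      have hfound : PySem.List.pyGet? dims ((dims.length : Int) - 1 - (k : Int))
          = some r := by
        rw [hcast, PySem.List.pyGet?_natCast, hdims2]
        rw [List.getElem?_append_right (by simp)]
        simp
      have hqrevnil : q.reverse.filter (pyRowVal row) = [] :=
        List.filter_eq_nil_iff.mpr
          (by intro x hx; simp [hqfalse x (List.mem_reverse.mp hx)])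
      have hfilter : dims.filter (pyRowVal row) =
          (w.reverse.filter (pyRowVal row)) ++ [r] := by
        rw [hdims2, List.filter_append, List.filter_cons]
        simp [hvr, hqrevnil]
      dsimp only
      rw [htw, hdw, hup, hdrop, hvals, zip_vals_filterMap, hfilter,
        List.getLast?_concat, hfound, List.filter_cons]
      simp [hvt]
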